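-- pv_equiv track=rewrite | github.com/haru-44/prime_text | src/is_wolstenholme_prime.py | is_wolstenholme_prime
-- ===== SOURCE A (Python) =====
-- def is_wolstenholme_prime(p: int) -> bool:
--     """ p がWolstenholme素数かを判定する
--
--     Args:
--         p (int): 11<=p である素数
--
--     Returns:
--         bool: pがWolstenholme素数ならTrue
--
--     Examples:
--         >>> is_wolstenholme_prime(16843)
--         True
--         >>> is_wolstenholme_prime(11)
--         False
--     """
--     k = p//6 + 1
--     delta1 = (3*k**2 + 3*k + 1) % p
--     delta2 = 12 - (p % 6)
--     k3 = pow(k, 3, p)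
--     coef0, coef1 = 1, 0
--     for _ in range(k, p//4 + 1):
--         coef0, coef1 = (coef0 * k3) % p, (coef0 + coef1 * k3) % p
--         k3 = (k3 + delta1) % p
--         delta1 = (delta1 + delta2) % p
--         delta2 = (delta2 + 6) % p
--     return coef1 == 0
-- ===== SOURCE B (Python) =====
-- def is_wolstenholme_prime(p: int) -> bool:
--     lo = p // 6 + 1
--     hi = p // 4
--     cubes = [pow(j, 3, p) for j in range(lo, hi + 1)]
--     # prefix[i] = product of cubes[:i] mod p, suffix[i] = product of cubes[i:] mod p
--     pre = [1]
--     for c in cubes: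
--         pre.append(pre[-1] * c % p)
--     suf = [1]
--     for c in reversed(cubes):
--         suf.append(c * suf[-1] % p)
--     suf.reverse()
--     total = sum(a * b for a, b in zip(pre, suf[1:]))
--     return total % p == 0
-- ===== Notes on version B (the rewrite author's own statement) =====
-- stated objective: alternative
-- what changed: Replaces A's finite-difference chain (delta1/delta2/k3) tracking successive cubes and the coupled (coef0, coef1) symmetric-coefficient recurrence by direct modular cubes pow(j,3,p) with prefix-product and suffix-product tables, combined in a single zip-sum; Pre_ excludes only p = 0, where both A and B raise ZeroDivisionError.
import Mathlib
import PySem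

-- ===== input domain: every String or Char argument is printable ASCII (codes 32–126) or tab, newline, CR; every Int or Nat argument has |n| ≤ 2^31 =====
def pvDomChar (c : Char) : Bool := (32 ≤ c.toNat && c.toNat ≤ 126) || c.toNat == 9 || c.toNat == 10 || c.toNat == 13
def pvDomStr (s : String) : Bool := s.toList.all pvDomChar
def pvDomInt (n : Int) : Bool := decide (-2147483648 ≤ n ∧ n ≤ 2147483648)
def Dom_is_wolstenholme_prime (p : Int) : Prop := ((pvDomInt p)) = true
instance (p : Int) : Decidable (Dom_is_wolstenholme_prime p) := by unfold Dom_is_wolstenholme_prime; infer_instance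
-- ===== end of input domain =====

-- B replaces A's finite-difference tracking of successive cubes and paired coefficient
-- recurrence by direct modular cubes with prefix/suffix product tables combined in one
-- zip-sum (objective: alternative structure, same cost).

-- ===== PORT A =====
-- one iteration of A's for-loop body (the loop variable is unused in A); state is
-- (coef0, coef1, k3, delta1, delta2)
def pvLoopA (p : Int) (s : Int × Int × Int × Int × Int) (_j : Int) : Int × Int × Int × Int × Int :=
  (PySem.Int.mod (s.1 * s.2.2.1) p, PySem.Int.mod (s.1 + s.2.1 * s.2.2.1) p,
   PySem.Int.mod (s.2.2.1 + s.2.2.2.1) p, PySem.Int.mod (s.2.2.2.1 + s.2.2.2.2) p,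
   PySem.Int.mod (s.2.2.2.2 + 6) p)

def is_wolstenholme_prime (p : Int) : Bool :=
  let k := PySem.Int.floordiv p 6 + 1
  let delta1 := PySem.Int.mod (3 * k ^ 2 + 3 * k + 1) p
  let delta2 := 12 - PySem.Int.mod p 6
  let k3 := PySem.Int.powMod k 3 p
  let st := (PySem.List.pyRange k (PySem.Int.floordiv p 4 + 1)).foldl (pvLoopA p)
      (1, 0, k3, delta1, delta2)
  st.2.1 == 0

-- ===== PORT B =====
-- pre = [1]; for c in cubes: pre.append(pre[-1] * c % p)   (head of acc = pre[-1]; reversed at the end)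
def pvPre (p : Int) (cubes : List Int) : List Int :=
  (cubes.foldl (fun acc c => PySem.Int.mod (acc.headI * c) p :: acc) [1]).reverse

-- suf = [1]; for c in reversed(cubes): suf.append(c * suf[-1] % p); suf.reverse()
-- (appending at the head while scanning reversed(cubes) yields the final, reversed suf directly)
def pvSuf (p : Int) (cubes : List Int) : List Int :=
  cubes.reverse.foldl (fun acc c => PySem.Int.mod (c * acc.headI) p :: acc) [1]

def is_wolstenholme_prime_alt (p : Int) : Bool :=
  let lo := PySem.Int.floordiv p 6 + 1
  let hi := PySem.Int.floordiv p 4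
  let cubes := (PySem.List.pyRange lo (hi + 1)).map (fun j => PySem.Int.powMod j 3 p)
  let pre := pvPre p cubes
  let suf := pvSuf p cubes
  let total := ((pre.zip suf.tail).map (fun ab => ab.1 * ab.2)).sum
  PySem.Int.mod total p == 0

-- ===== PRECONDITION & SPEC =====
-- Python A raises ZeroDivisionError at p = 0 (division by zero in p//6); B raises there too.
def Pre_is_wolstenholme_prime (p : Int) : Prop := p ≠ 0
instance (p : Int) : Decidable (Pre_is_wolstenholme_prime p) := by unfold Pre_is_wolstenholme_prime; infer_instance
def pvWitness_is_wolstenholme_prime : Int := (11)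

def Spec_is_wolstenholme_prime (p : Int) (out : Bool) : Prop := out = is_wolstenholme_prime_alt p
instance (p : Int) (out : Bool) : Decidable (Spec_is_wolstenholme_prime p out) := by unfold Spec_is_wolstenholme_prime; infer_instance

-- ===== CLAIM (what is proved, stated in full; the proofs are below) =====
def Claim_equal_is_wolstenholme_prime : Prop := ∀ (p : Int), Dom_is_wolstenholme_prime p → Pre_is_wolstenholme_prime p → Spec_is_wolstenholme_prime p (is_wolstenholme_prime p)

-- ===== LEMMAS AND PROOFS =====

-- `PySem.Int.mod` (Python `%`) returns a representative of x mod p …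
theorem pvModEq (x p : Int) : (PySem.Int.mod x p) ≡ x [ZMOD p] := by
  show Int.fmod x p % p = x % p
  rw [Int.fmod_eq_emod]
  split_ifs with h <;> simp [Int.emod_emod_of_dvd]

-- … and depends only on the residue class of x mod p
theorem pvModCongr {x y p : Int} (h : x ≡ y [ZMOD p]) : PySem.Int.mod x p = PySem.Int.mod y p := by
  obtain ⟨c, hc⟩ := (Int.modEq_iff_dvd.mp h)
  have hx : x = y + p * (-c) := by linarith [hc]
  show Int.fmod x p = Int.fmod y p
  rw [hx, Int.add_mul_fmod_self_left]

-- the canonical cube A's difference chain tracks and B computes directly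
def pvCube (p j : Int) : Int := PySem.Int.mod (j ^ 3) p

-- e L = Σ_j ∏_{i ≠ j} L_i  (sum of products of all but one element)
def pvE : List Int → Int
  | [] => 0
  | c :: L => L.prod + c * pvE L

-- A's (coef0, coef1) recurrence over an explicit list of cube values
def pvFold2 (p : Int) (L : List Int) (s : Int × Int) : Int × Int :=
  L.foldl (fun s c => (PySem.Int.mod (s.1 * c) p, PySem.Int.mod (s.1 + s.2 * c) p)) s

-- A's five-state loop projects to pvFold2 over the canonical cube list
theorem pvA_chain (p : Int) (n : Nat) : ∀ (j c0 c1 k3 d1 d2 : Int),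
    k3 = pvCube p j →
    d1 ≡ 3 * j ^ 2 + 3 * j + 1 [ZMOD p] →
    d2 ≡ 6 * j + 6 [ZMOD p] →
    (((PySem.List.pyRange j (j + n)).foldl (pvLoopA p) (c0, c1, k3, d1, d2)).1,
     ((PySem.List.pyRange j (j + n)).foldl (pvLoopA p) (c0, c1, k3, d1, d2)).2.1) =
      pvFold2 p ((PySem.List.pyRange j (j + n)).map (pvCube p)) (c0, c1) := by
  induction n with
  | zero =>
    intro j c0 c1 k3 d1 d2 _ _ _
    rw [PySem.List.pyRange_one_eq_nil (by simp)]
    rfl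
  | succ n ih =>
    intro j c0 c1 k3 d1 d2 hk3 hd1 hd2
    have hlt : j < j + ((n : Nat) + 1 : Nat) := by push_cast; omega
    rw [PySem.List.pyRange_one_cons hlt]
    have hshift : j + ((n : Nat) + 1 : Nat) = (j + 1) + (n : Nat) := by push_cast; ring
    rw [hshift]
    simp only [List.foldl_cons, List.map_cons]
    have hk3' : PySem.Int.mod (k3 + d1) p = pvCube p (j + 1) := by
      unfold pvCube
      refine pvModCongr ?_
      have : k3 ≡ j ^ 3 [ZMOD p] := hk3 ▸ pvModEq _ _
      refine (this.add hd1).trans ?_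
      have e : j ^ 3 + (3 * j ^ 2 + 3 * j + 1) = (j + 1) ^ 3 := by ring
      rw [e]
    have hd1' : PySem.Int.mod (d1 + d2) p ≡ 3 * (j + 1) ^ 2 + 3 * (j + 1) + 1 [ZMOD p] := by
      refine (pvModEq _ _).trans ((hd1.add hd2).trans ?_)
      have e : 3 * j ^ 2 + 3 * j + 1 + (6 * j + 6) = 3 * (j + 1) ^ 2 + 3 * (j + 1) + 1 := by ring
      rw [e]
    have hd2' : PySem.Int.mod (d2 + 6) p ≡ 6 * (j + 1) + 6 [ZMOD p] := by
      refine (pvModEq _ _).trans (((hd2.add (Int.ModEq.refl 6))).trans ?_)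
      have e : 6 * j + 6 + 6 = 6 * (j + 1) + 6 := by ring
      rw [e]
    have := ih (j + 1) (PySem.Int.mod (c0 * k3) p) (PySem.Int.mod (c0 + c1 * k3) p)
      (PySem.Int.mod (k3 + d1) p) (PySem.Int.mod (d1 + d2) p) (PySem.Int.mod (d2 + 6) p)
      hk3' hd1' hd2'
    simp only [pvLoopA] at this ⊢
    rw [this, hk3]
    rfl

-- value of pvFold2 modulo p …
theorem pvFold2_modeq (p : Int) (L : List Int) : ∀ c0 c1,
    (pvFold2 p L (c0, c1)).1 ≡ c0 * L.prod [ZMOD p] ∧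
    (pvFold2 p L (c0, c1)).2 ≡ c1 * L.prod + c0 * pvE L [ZMOD p] := by
  induction L with
  | nil => intro c0 c1; simp [pvFold2, pvE]
  | cons c L ih =>
    intro c0 c1
    have h := ih (PySem.Int.mod (c0 * c) p) (PySem.Int.mod (c0 + c1 * c) p)
    have hstep : pvFold2 p (c :: L) (c0, c1)
        = pvFold2 p L (PySem.Int.mod (c0 * c) p, PySem.Int.mod (c0 + c1 * c) p) := rfl
    rw [hstep]
    constructor
    · rw [List.prod_cons]
      have e : c0 * (c * L.prod) = (c0 * c) * L.prod := by ring
      rw [e]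
      exact h.1.trans ((pvModEq _ _).mul_right _)
    · simp only [pvE, List.prod_cons]
      have e : c1 * (c * L.prod) + c0 * (L.prod + c * pvE L)
          = (c0 + c1 * c) * L.prod + (c0 * c) * pvE L := by ring
      rw [e]
      exact h.2.trans (((pvModEq _ _).mul_right _).add ((pvModEq _ _).mul_right _))

-- … and the syntactic shape of its second component (its initial value or a reduced residue)
theorem pvFold2_shape (p : Int) (L : List Int) : ∀ c0 c1,
    (pvFold2 p L (c0, c1)).2 = c1 ∨ ∃ x, (pvFold2 p L (c0, c1)).2 = PySem.Int.mod x p := by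
  induction L with
  | nil => intro c0 c1; exact Or.inl rfl
  | cons c L ih =>
    intro c0 c1
    have hstep : pvFold2 p (c :: L) (c0, c1)
        = pvFold2 p L (PySem.Int.mod (c0 * c) p, PySem.Int.mod (c0 + c1 * c) p) := rfl
    rw [hstep]
    rcases ih (PySem.Int.mod (c0 * c) p) (PySem.Int.mod (c0 + c1 * c) p) with h | ⟨x, hx⟩
    · exact Or.inr ⟨_, h⟩
    · exact Or.inr ⟨x, hx⟩

-- recursive characterisations of B's two scans
def pvScan (p a : Int) : List Int → List Int
  | [] => [a]
  | c :: L => a :: pvScan p (PySem.Int.mod (a * c) p) L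

theorem pvPre_gen (p : Int) (L : List Int) : ∀ (a : Int) (rest : List Int),
    (L.foldl (fun acc c => PySem.Int.mod (acc.headI * c) p :: acc) (a :: rest)).reverse
      = rest.reverse ++ pvScan p a L := by
  induction L with
  | nil => intro a rest; simp [pvScan]
  | cons c L ih =>
    intro a rest
    simp only [List.foldl_cons, List.headI_cons]
    rw [ih]
    simp [pvScan]

theorem pvPre_eq_scan (p : Int) (L : List Int) : pvPre p L = pvScan p 1 L := by
  unfold pvPre
  rw [pvPre_gen p L 1 []]
  simp

theorem pvSuf_cons (p c : Int) (L : List Int) :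
    pvSuf p (c :: L) = PySem.Int.mod (c * (pvSuf p L).headI) p :: pvSuf p L := by
  unfold pvSuf
  rw [List.reverse_cons, List.foldl_append]
  simp

theorem pvSuf_eq_cons (p : Int) (L : List Int) :
    pvSuf p L = (pvSuf p L).headI :: (pvSuf p L).tail := by
  cases L with
  | nil => rfl
  | cons c L => rw [pvSuf_cons]; rfl

theorem pvSuf_head (p : Int) (L : List Int) : (pvSuf p L).headI ≡ L.prod [ZMOD p] := by
  induction L with
  | nil => simp [pvSuf]
  | cons c L ih =>
    rw [pvSuf_cons, List.headI_cons, List.prod_cons]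
    exact (pvModEq _ _).trans ((Int.ModEq.refl c).mul ih)

-- B's zip-sum is (a times) the sum of products of all-but-one, modulo p
theorem pvB_total (p : Int) (L : List Int) : ∀ a,
    (((pvScan p a L).zip (pvSuf p L).tail).map (fun ab => ab.1 * ab.2)).sum ≡ a * pvE L [ZMOD p] := by
  induction L with
  | nil => intro a; simp [pvScan, pvSuf, pvE]
  | cons c L ih =>
    intro a
    rw [pvSuf_cons]
    simp only [pvScan, List.tail_cons]
    rw [pvSuf_eq_cons p L, List.zip_cons_cons, List.map_cons, List.sum_cons]
    have h1 : a * (pvSuf p L).headI ≡ a * L.prod [ZMOD p] :=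
      (pvSuf_head p L).mul_left a
    have h2 := (ih (PySem.Int.mod (a * c) p)).trans
      (((pvModEq (a * c) p).mul_right (pvE L)))
    refine (h1.add h2).trans ?_
    have : a * L.prod + a * c * pvE L = a * (L.prod + c * pvE L) := by ring
    rw [this, pvE]

-- the two ports agree on every input
theorem pvMain (p : Int) : is_wolstenholme_prime p = is_wolstenholme_prime_alt p := by
  have hk : PySem.Int.floordiv p 6 + 1 = PySem.Int.floordiv p 6 + 1 := rfl
  set k := PySem.Int.floordiv p 6 + 1 with hkdef
  set m1 := PySem.Int.floordiv p 4 + 1 with hm1def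
  set L := (PySem.List.pyRange k m1).map (pvCube p) with hLdef
  -- A reduces to pvFold2 over the cube list
  have hA : is_wolstenholme_prime p = ((pvFold2 p L (1, 0)).2 == 0) := by
    rcases le_total m1 k with hle | hle
    · show (((PySem.List.pyRange k m1).foldl (pvLoopA p)
        (1, 0, PySem.Int.powMod k 3 p, PySem.Int.mod (3 * k ^ 2 + 3 * k + 1) p,
          12 - PySem.Int.mod p 6)).2.1 == 0) = _
      rw [hLdef, PySem.List.pyRange_one_eq_nil hle]
      rfl
    · have hn : m1 = k + (((m1 - k).toNat : Nat) : Int) := by omega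
      have hd2 : (12 - PySem.Int.mod p 6) ≡ 6 * k + 6 [ZMOD p] := by
        refine Int.ModEq.symm (Int.modEq_iff_dvd.mpr ⟨-1, ?_⟩)
        have hp6 := PySem.Int.floordiv_mul_add_mod p 6
        rw [hkdef]
        linarith [hp6]
      have hd1 : PySem.Int.mod (3 * k ^ 2 + 3 * k + 1) p ≡ 3 * k ^ 2 + 3 * k + 1 [ZMOD p] :=
        pvModEq _ _
      have hchain := pvA_chain p (m1 - k).toNat k 1 0 (PySem.Int.powMod k 3 p)
        (PySem.Int.mod (3 * k ^ 2 + 3 * k + 1) p) (12 - PySem.Int.mod p 6) rfl hd1 hd2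
      rw [← hn] at hchain
      show (((PySem.List.pyRange k m1).foldl (pvLoopA p)
        (1, 0, PySem.Int.powMod k 3 p, PySem.Int.mod (3 * k ^ 2 + 3 * k + 1) p,
          12 - PySem.Int.mod p 6)).2.1 == 0) = _
      have h2 := congrArg Prod.snd hchain
      dsimp only at h2
      rw [h2]
  -- B reduces to the zip-sum over the same cube list
  have hB : is_wolstenholme_prime_alt p =
      (PySem.Int.mod (((pvScan p 1 L).zip (pvSuf p L).tail).map (fun ab => ab.1 * ab.2)).sum p == 0) := by
    show (PySem.Int.mod (((pvPre p L).zip (pvSuf p L).tail).map (fun ab => ab.1 * ab.2)).sum p == 0) = _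
    rw [pvPre_eq_scan]
  rw [hA, hB]
  have hX : (pvFold2 p L (1, 0)).2 ≡ pvE L [ZMOD p] := by
    have := (pvFold2_modeq p L 1 0).2
    simpa using this
  have hT := (pvB_total p L 1).trans (by rw [one_mul] : (1 : Int) * pvE L ≡ pvE L [ZMOD p])
  rcases pvFold2_shape p L 1 0 with h0 | ⟨x, hx⟩
  · rw [h0]
    have : PySem.Int.mod (((pvScan p 1 L).zip (pvSuf p L).tail).map (fun ab => ab.1 * ab.2)).sum p = 0 := by
      have hz : (((pvScan p 1 L).zip (pvSuf p L).tail).map (fun ab => ab.1 * ab.2)).sum ≡ 0 [ZMOD p] :=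
        hT.trans (h0 ▸ hX.symm)
      rw [pvModCongr hz]
      show Int.fmod 0 p = 0
      simp
    rw [this]
  · rw [hx]
    have hcongr : PySem.Int.mod (((pvScan p 1 L).zip (pvSuf p L).tail).map (fun ab => ab.1 * ab.2)).sum p
        = PySem.Int.mod x p := by
      refine pvModCongr (hT.trans (hX.symm.trans ?_))
      rw [hx]
      exact pvModEq x p
    rw [hcongr]

-- ===== VERDICT (by name: the statement is the Claim_ definition above) =====
theorem is_wolstenholme_prime_spec : Claim_equal_is_wolstenholme_prime := by
  intro p _ _
  exact (pvMain p).symm ▸ rfl
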